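-- pv_equiv track=rewrite | github.com/cristiansimioni/gestaoregionalizadarsu | src/combinations/combinations.py | sorted_k_partitions
-- ===== SOURCE A (Python) =====
-- def sorted_k_partitions(seq, k):
--     """Returns a list of all unique k-partitions of `seq`.
--
--     Each partition is a list of parts, and each part is a tuple.
--
--     The parts in each individual partition will be sorted in shortlex
--     order (i.e., by length first, then lexicographically).
--
--     The overall list of partitions will then be sorted by the length
--     of their first part, the length of their second part, ...,
--     the length of their last part, and then lexicographically.
--     """
--     n = len(seq)
--     groups = []  # a list of lists, currently empty
--
--     def generate_partitions(i):
--         if i >= n: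
--             yield list(map(tuple, groups))
--         else:
--             if n - i > k - len(groups):
--                 for group in groups:
--                     group.append(seq[i])
--                     yield from generate_partitions(i + 1)
--                     group.pop()
--
--             if len(groups) < k:
--                 groups.append([seq[i]])
--                 yield from generate_partitions(i + 1)
--                 groups.pop()
--
--     result = generate_partitions(0)
--
--     # Sort the parts in each partition in shortlex order
--     #result = [sorted(ps, key = lambda p: (len(p), p)) for ps in result]
--     # Sort partitions by the length of each part, then lexicographically.
--     #result = sorted(result, key = lambda ps: (*map(len, ps), ps))
--
--     return result
-- ===== SOURCE B (Python) =====
-- def sorted_k_partitions(seq, k):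
--     """Same partitions in the same order as the recursive version, but
--     computed by an iterative breadth-wise frontier expansion (yields lazily)."""
--     n = len(seq)
--     states = [[]]
--     for i, x in enumerate(seq):
--         nxt = []
--         for groups in states:
--             if n - i > k - len(groups):
--                 for j in range(len(groups)):
--                     nxt.append(groups[:j] + [groups[j] + (x,)] + groups[j+1:])
--             if len(groups) < k:
--                 nxt.append(groups + [(x,)])
--         states = nxt
--     yield from states
-- ===== Notes on version B (the rewrite author's own statement) =====
-- stated objective: alternative
-- what changed: Replaces the recursive backtracking generator over a shared mutable groups list with an iterative breadth-wise frontier expansion: one pass over the elements, expanding every partial partition into its successors in A's branch order, which preserves the exact yield order.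
import Mathlib
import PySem

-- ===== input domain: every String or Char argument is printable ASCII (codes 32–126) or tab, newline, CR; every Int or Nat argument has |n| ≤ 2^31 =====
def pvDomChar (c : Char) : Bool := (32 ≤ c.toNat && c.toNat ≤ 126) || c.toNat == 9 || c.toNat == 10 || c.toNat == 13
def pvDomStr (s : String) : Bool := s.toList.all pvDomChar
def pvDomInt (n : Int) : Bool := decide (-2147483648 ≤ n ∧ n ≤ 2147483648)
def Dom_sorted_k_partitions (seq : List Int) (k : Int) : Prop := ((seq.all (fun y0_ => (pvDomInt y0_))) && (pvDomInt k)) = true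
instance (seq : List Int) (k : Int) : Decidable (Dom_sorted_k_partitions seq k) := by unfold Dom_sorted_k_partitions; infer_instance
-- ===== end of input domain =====

-- B replaces A's recursive backtracking generator by an iterative breadth-wise
-- frontier expansion (objective: alternative decomposition, same cost).
-- Both Pythons return lazy generators; the equivalence is about the yielded sequence.

-- ===== PORT A =====
-- generate_partitions(i) with the mutable `groups` passed explicitly;
-- `yield list(map(tuple, groups))` is just `[groups]`, `for group in groups:
-- group.append(..) … group.pop()` is the flatMap over the group indices.
def pvGenA (seq : List Int) (k : Int) (groups : List (List Int)) (i : Nat) :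
    List (List (List Int)) :=
  if _h : i ≥ seq.length then [groups]
  else
    match seq[i]? with
    | none => []  -- unreachable: i < len(seq)
    | some x =>
      (if ((seq.length : Int) - i > k - groups.length) then
        (List.range groups.length).flatMap
          (fun j => pvGenA seq k (groups.set j ((groups.getD j []) ++ [x])) (i+1))
      else []) ++
      (if ((groups.length : Int) < k) then pvGenA seq k (groups ++ [[x]]) (i+1) else [])
termination_by seq.length - i

def sorted_k_partitions (seq : List Int) (k : Int) : List (List (List Int)) :=
  pvGenA seq k [] 0

-- ===== PORT B =====
-- children of one frontier state `groups` at element (i, x) (the body of Source B's inner loop)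
def pvChildrenB (n k : Int) (i : Int) (x : Int) (groups : List (List Int)) :
    List (List (List Int)) :=
  (if n - i > k - groups.length then
    (List.range groups.length).map
      (fun j => groups.take j ++ [(groups.getD j []) ++ [x]] ++ groups.drop (j+1))
  else []) ++
  (if ((groups.length : Int) < k) then [groups ++ [[x]]] else [])

def sorted_k_partitions_alt (seq : List Int) (k : Int) : List (List (List Int)) :=
  (PySem.List.enumerate seq).foldl
    (fun states p => states.flatMap (pvChildrenB (seq.length : Int) k p.1 p.2)) [[]]

-- ===== PRECONDITION & SPEC =====
def Spec_sorted_k_partitions (seq : List Int) (k : Int) (out : List (List (List Int))) : Prop := out = sorted_k_partitions_alt seq k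
instance (seq : List Int) (k : Int) (out : List (List (List Int))) : Decidable (Spec_sorted_k_partitions seq k out) := by unfold Spec_sorted_k_partitions; infer_instance

-- ===== CLAIM (what is proved, stated in full; the proofs are below) =====
def Claim_equal_sorted_k_partitions : Prop := ∀ (seq : List Int) (k : Int), Dom_sorted_k_partitions seq k → Spec_sorted_k_partitions seq k (sorted_k_partitions seq k)

-- ===== LEMMAS AND PROOFS =====

-- the fold of B's step distributes over the frontier list
theorem pvFold_flatMap (n k : Int) (l : List (Int × Int)) (states : List (List (List Int))) :
    l.foldl (fun states p => states.flatMap (pvChildrenB n k p.1 p.2)) states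
      = states.flatMap (fun s =>
          l.foldl (fun states p => states.flatMap (pvChildrenB n k p.1 p.2)) [s]) := by
  induction l generalizing states with
  | nil => simp
  | cons p l ih =>
    simp only [List.foldl_cons]
    rw [ih]
    have h2 : (fun s : List (List Int) =>
        l.foldl (fun states p => states.flatMap (pvChildrenB n k p.1 p.2))
          (List.flatMap (pvChildrenB n k p.1 p.2) [s]))
        = fun s => List.flatMap
            (fun t => l.foldl (fun states p => states.flatMap (pvChildrenB n k p.1 p.2)) [t])
            (List.flatMap (pvChildrenB n k p.1 p.2) [s]) := funext fun s => ih _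
    rw [h2]
    simp [List.flatMap_assoc]

-- A's children at (i, x) coincide with B's
theorem pvChildren_eq (seq : List Int) (k : Int) (i : Nat) (x : Int)
    (groups : List (List Int)) :
    pvChildrenB (seq.length : Int) k (i : Int) x groups
      = (if ((seq.length : Int) - i > k - groups.length) then
          (List.range groups.length).map
            (fun j => groups.set j ((groups.getD j []) ++ [x]))
        else []) ++
        (if ((groups.length : Int) < k) then [groups ++ [[x]]] else []) := by
  unfold pvChildrenB
  congr 1
  split_ifs with h
  · apply List.map_congr_left
    intro j hj
    have hj' : j < groups.length := List.mem_range.mp hj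
    rw [List.set_eq_take_cons_drop _ hj']
    simp
  · rfl

-- main invariant: the recursive DFS from state `groups` at index i equals
-- B's fold over the remaining enumerated elements started from [groups]
theorem pvGenA_eq_fold (seq : List Int) (k : Int) :
    ∀ i groups, pvGenA seq k groups i
      = (PySem.List.enumerate (seq.drop i) (i : Int)).foldl
          (fun states p => states.flatMap (pvChildrenB (seq.length : Int) k p.1 p.2))
          [groups] := by
  intro i
  induction hfuel : seq.length - i using Nat.strong_induction_on generalizing i with
  | _ fuel ih =>
  intro groups
  by_cases h : i ≥ seq.length
  · rw [pvGenA, dif_pos h]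
    rw [List.drop_eq_nil_of_le h]
    simp [PySem.List.enumerate]
  · have hi : i < seq.length := Nat.lt_of_not_le h
    have hdrop : seq.drop i = seq[i] :: seq.drop (i+1) := List.drop_eq_getElem_cons hi
    rw [hdrop, PySem.List.enumerate_cons, List.foldl_cons, pvFold_flatMap]
    have hrec : ∀ g : List (List Int), pvGenA seq k g (i+1)
        = (PySem.List.enumerate (seq.drop (i+1)) ((i : Int) + 1)).foldl
            (fun states p => states.flatMap (pvChildrenB (seq.length : Int) k p.1 p.2)) [g] := by
      intro g
      have : seq.length - (i+1) < fuel := by omega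
      have := ih _ this (i+1) rfl g
      simpa using this
    rw [pvGenA, dif_neg h]
    simp only [List.getElem?_eq_getElem hi]
    rw [List.flatMap_singleton, pvChildren_eq, List.flatMap_append]
    simp only [hrec]
    congr 1
    · split_ifs with hg
      · simp [List.flatMap_map]
      · simp
    · split_ifs with hg <;> simp

-- ===== VERDICT (by name: the statement is the Claim_ definition above) =====
theorem sorted_k_partitions_spec : Claim_equal_sorted_k_partitions := by
  intro seq k _
  unfold Spec_sorted_k_partitions sorted_k_partitions sorted_k_partitions_alt
  rw [pvGenA_eq_fold]
  simp
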